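-- pv_equiv track=rewrite | github.com/haimavni/place_stories_server | controllers/port_old_db.py | dash_to_camel
-- ===== SOURCE A (Python) =====
-- def dash_to_camel(s):
--     b = True
--     t = ""
--     for c in s:
--         if b:
--             c = c.upper()
--             b = False
--         if c == "_":
--             b = True
--             continue
--         t += c
--     return t
-- ===== SOURCE B (Python) =====
-- def dash_to_camel(s):
--     return "".join(part[:1].upper() + part[1:] for part in s.split("_"))
-- ===== Notes on version B (the rewrite author's own statement) =====
-- stated objective: simpler
-- what changed: Replaces the char-by-char loop with a capitalize-next state flag and repeated string += by a one-line split-on-underscore, uppercase-first-char-of-each-segment, join decomposition.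
import Mathlib
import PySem

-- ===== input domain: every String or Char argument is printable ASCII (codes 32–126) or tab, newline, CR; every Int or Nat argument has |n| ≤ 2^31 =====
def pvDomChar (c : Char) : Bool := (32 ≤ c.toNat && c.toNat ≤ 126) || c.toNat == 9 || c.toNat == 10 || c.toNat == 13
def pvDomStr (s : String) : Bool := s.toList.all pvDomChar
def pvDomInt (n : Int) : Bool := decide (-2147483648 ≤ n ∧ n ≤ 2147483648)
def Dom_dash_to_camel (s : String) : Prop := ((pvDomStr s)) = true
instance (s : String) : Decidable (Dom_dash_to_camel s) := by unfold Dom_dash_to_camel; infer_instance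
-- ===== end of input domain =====

-- B replaces A's char-by-char loop with a capitalize-next-char state flag by a split-on-"_" / uppercase-first-char / join decomposition (objective: simpler).

-- ===== PORT A =====
-- A's loop body on state (b, t): uppercase c when b is set, drop '_' and re-arm b, else append.
def stepA (st : Bool × String) (c : Char) : Bool × String :=
  let c2 := if st.1 then PySem.Chars.upperChar c else c
  let b2 := if st.1 then false else st.1
  if c2 = '_' then (true, st.2) else (b2, st.2.push c2)

def dash_to_camel (s : String) : String :=
  (s.toList.foldl stepA (true, "")).2

-- ===== PORT B =====
-- part[:1].upper() + part[1:]
def capPartB (part : String) : String :=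
  PySem.Str.upper (PySem.Str.slice part none (some 1)) ++ PySem.Str.slice part (some 1) none

def dash_to_camel_alt (s : String) : String :=
  match PySem.Str.split? s "_" with
  | some parts => PySem.Str.join "" (parts.map capPartB)
  | none => ""   -- unreachable: the separator "_" is non-empty, Python's split never raises here

-- ===== PRECONDITION & SPEC =====
def Spec_dash_to_camel (s : String) (out : String) : Prop := out = dash_to_camel_alt s
instance (s : String) (out : String) : Decidable (Spec_dash_to_camel s out) := by unfold Spec_dash_to_camel; infer_instance

-- ===== CLAIM (what is proved, stated in full; the proofs are below) =====
def Claim_equal_dash_to_camel : Prop := ∀ (s : String), Dom_dash_to_camel s → Spec_dash_to_camel s (dash_to_camel s)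

-- ===== LEMMAS AND PROOFS =====

-- A's emitted characters, as a recursion over the remaining input.
def loopA : Bool → List Char → List Char
  | _, [] => []
  | b, c :: cs =>
    let c2 := if b then PySem.Chars.upperChar c else c
    if c2 = '_' then loopA true cs else c2 :: loopA false cs

-- split on '_' with an explicit current-segment accumulator (reference shape for splitOn.go).
def mySplit : List Char → List Char → List (List Char)
  | cur, [] => [cur]
  | cur, c :: cs => if c = '_' then cur :: mySplit [] cs else mySplit (cur ++ [c]) cs

-- capitalize the first character of a segment
def capL : List Char → List Char
  | [] => []
  | c :: r => PySem.Chars.upperChar c :: r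

theorem upperChar_underscore : PySem.Chars.upperChar '_' = '_' := by decide

theorem upperChar_ne_underscore {c : Char} (h : c ≠ '_') : PySem.Chars.upperChar c ≠ '_' := by
  unfold PySem.Chars.upperChar PySem.Chars.islower
  split_ifs with hl
  · simp only [Bool.and_eq_true, decide_eq_true_eq] at hl
    have h1 : 97 ≤ c.toNat := hl.1
    have h2 : c.toNat ≤ 122 := hl.2
    intro hc
    have hval : (c.toNat - 32).isValidChar := Or.inl (by omega)
    have ht := congrArg Char.toNat hc
    rw [Char.toNat_ofNat, if_pos hval] at ht
    have ht' : c.toNat - 32 = 95 := ht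
    omega
  · exact h

theorem go_cons (fuel : Nat) (c : Char) (rest cur : List Char) (acc : List (List Char)) :
    PySem.Chars.splitOn.go ['_'] (fuel+1) (c :: rest) cur acc =
    (if c = '_' then PySem.Chars.splitOn.go ['_'] fuel rest [] (cur.reverse :: acc)
     else PySem.Chars.splitOn.go ['_'] fuel rest (c :: cur) acc) := by
  rw [PySem.Chars.splitOn.go]
  by_cases hc : c = '_'
  · subst hc; simp [List.isPrefixOf]
  · simp [List.isPrefixOf, hc, Ne.symm hc]

theorem go_nil (fuel : Nat) (cur : List Char) (acc : List (List Char)) :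
    PySem.Chars.splitOn.go ['_'] fuel [] cur acc = (cur.reverse :: acc).reverse := by
  cases fuel <;> rw [PySem.Chars.splitOn.go] <;> simp

theorem go_eq_mySplit : ∀ (fuel : Nat) (l cur : List Char) (acc : List (List Char)),
    l.length ≤ fuel →
    PySem.Chars.splitOn.go ['_'] fuel l cur acc = acc.reverse ++ mySplit cur.reverse l := by
  intro fuel
  induction fuel with
  | zero =>
    intro l cur acc h
    have : l = [] := List.eq_nil_of_length_eq_zero (Nat.le_zero.mp h)
    subst this
    rw [go_nil]
    simp [mySplit]
  | succ n ih =>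
    intro l cur acc h
    cases l with
    | nil => rw [go_nil]; simp [mySplit]
    | cons c rest =>
      rw [go_cons]
      simp only [List.length_cons] at h
      by_cases hc : c = '_'
      · subst hc
        rw [if_pos rfl, ih rest [] (cur.reverse :: acc) (by omega)]
        simp [mySplit]
      · rw [if_neg hc, ih rest (c :: cur) acc (by omega)]
        simp [mySplit, hc]

theorem splitOn_eq_mySplit (cs : List Char) : PySem.Chars.splitOn cs ['_'] = mySplit [] cs := by
  unfold PySem.Chars.splitOn
  rw [go_eq_mySplit (cs.length + 1) cs [] [] (by omega)]
  simp

theorem join_nil_eq_flatten (parts : List (List Char)) :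
    PySem.Chars.join [] parts = parts.flatten := by
  unfold PySem.Chars.join
  induction parts with
  | nil => simp [List.intercalate]
  | cons p ps ih =>
    cases ps with
    | nil => simp [List.intercalate]
    | cons q qs =>
      simp only [List.intercalate] at *
      simp only [List.intersperse] at *
      simp_all

theorem capL_append {cur : List Char} (c : Char) (h : cur ≠ []) :
    capL (cur ++ [c]) = capL cur ++ [c] := by
  cases cur with
  | nil => exact absurd rfl h
  | cons a r => simp [capL]

-- the core correspondence: capitalized segments, joined, are exactly what A's loop emits
theorem mySplit_capL_loopA : ∀ (cs cur : List Char),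
    ((mySplit cur cs).map capL).flatten = capL cur ++ loopA cur.isEmpty cs := by
  intro cs
  induction cs with
  | nil =>
    intro cur
    simp [mySplit, loopA]
  | cons c rest ih =>
    intro cur
    by_cases hc : c = '_'
    · subst hc
      have h1 : ((mySplit [] rest).map capL).flatten = loopA true rest := by
        simpa [capL] using ih []
      rw [show mySplit cur ('_' :: rest) = cur :: mySplit [] rest from by simp [mySplit]]
      have h2 : loopA cur.isEmpty ('_' :: rest) = loopA true rest := by
        cases cur.isEmpty <;> simp [loopA, upperChar_underscore]
      rw [h2]
      simp [h1]
    · rw [show mySplit cur (c :: rest) = mySplit (cur ++ [c]) rest from by simp [mySplit, hc]]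
      rw [ih (cur ++ [c])]
      cases cur with
      | nil =>
        have h3 : loopA true (c :: rest) = PySem.Chars.upperChar c :: loopA false rest := by
          simp [loopA, upperChar_ne_underscore hc]
        simp [capL, h3]
      | cons a r =>
        rw [capL_append c (by simp)]
        have h4 : loopA (a :: r).isEmpty (c :: rest) = c :: loopA false rest := by
          simp [loopA, hc]
        rw [h4]
        simp

theorem foldA_eq_loopA : ∀ (cs : List Char) (b : Bool) (t : String),
    (cs.foldl stepA (b, t)).2.toList = t.toList ++ loopA b cs := by
  intro cs
  induction cs with
  | nil => intro b t; simp [loopA]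
  | cons c rest ih =>
    intro b t
    simp only [List.foldl_cons]
    by_cases h : (if b then PySem.Chars.upperChar c else c) = '_'
    · rw [show stepA (b, t) c = (true, t) from by simp [stepA, h]]
      rw [ih]
      simp [loopA, h]
    · rw [show stepA (b, t) c =
          ((if b then false else b), t.push (if b then PySem.Chars.upperChar c else c)) from by
        simp [stepA, h]]
      rw [ih]
      cases b <;> simp_all [loopA]

theorem capPartB_toList (p : String) : (capPartB p).toList = capL p.toList := by
  unfold capPartB
  simp only [String.toList_append, PySem.Str.toList_upper, PySem.Str.toList_slice,
    PySem.Chars.slice_eq_listSlice]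
  rw [PySem.List.slice_to p.toList (by norm_num : (0:Int) ≤ 1),
      PySem.List.slice_from p.toList (by norm_num : (0:Int) ≤ 1)]
  cases p.toList with
  | nil => simp [PySem.Chars.upper, capL]
  | cons c r => simp [PySem.Chars.upper, capL]

-- ===== VERDICT (by name: the statement is the Claim_ definition above) =====
theorem dash_to_camel_spec : Claim_equal_dash_to_camel := by
  intro s _
  unfold Spec_dash_to_camel
  rw [← String.toList_inj]
  unfold dash_to_camel dash_to_camel_alt
  have hsplit : PySem.Str.split? s "_" =
      some ((PySem.Chars.splitOn s.toList ['_']).map String.ofList) := by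
    unfold PySem.Str.split? PySem.Chars.split?
    simp
  rw [hsplit]
  rw [foldA_eq_loopA]
  simp only [PySem.Str.toList_join, List.map_map]
  have hmap : (PySem.Chars.splitOn s.toList ['_']).map (String.toList ∘ capPartB ∘ String.ofList)
      = (PySem.Chars.splitOn s.toList ['_']).map capL := by
    apply List.map_congr_left
    intro p _
    simp [Function.comp, capPartB_toList]
  rw [show ("" : String).toList = [] from rfl, join_nil_eq_flatten, hmap, splitOn_eq_mySplit]
  have hcore := mySplit_capL_loopA s.toList []
  simp only [List.isEmpty_nil, capL, List.nil_append] at hcore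
  rw [hcore]
  simp
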